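-- pv_equiv track=rewrite | github.com/Yasmixe/CryptoTools | miroir.py | chiffre_miroir_et_cesar
-- ===== SOURCE A (Python) =====
-- def miroir(text):
--     return text[::-1]
--
-- def chiffre_cesar(text, cle):
--     resultat = ""
--     for char in text:
--         if char.isalpha():
--             decalage = cle % 26
--             if char.islower():
--                 nouvel_char = chr(((ord(char) - ord('a') - decalage) % 26) + ord('a'))
--             else:
--                 nouvel_char = chr(((ord(char) - ord('A') - decalage) % 26) + ord('A'))
--             resultat += nouvel_char
--         else:
--             resultat += char
--     return resultat
--
-- def chiffre_miroir_et_cesar(phrase):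
--     mots = phrase.split()
--     resultat = []
--     for mot in mots:
--         if mot == miroir(mot):
--             resultat.append(chiffre_cesar(mot,3))  # Chiffrement de César pour les palindromes
--         else:
--             resultat.append(miroir(mot))  # Chiffrement en miroir pour les non-palindromes
--     return " ".join(resultat)
-- ===== SOURCE B (Python) =====
-- # Different algorithm: reverse the WHOLE phrase once, so every word of the reversed
-- # phrase is already the mirror of an original word (no per-word reversal); palindromes
-- # are Caesar-shifted via a rotated-alphabet index lookup; the output is built
-- # back-to-front and un-reversed at the end.
-- def chiffre_miroir_et_cesar(phrase):
--     lower = "abcdefghijklmnopqrstuvwxyz"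
--     upper = "ABCDEFGHIJKLMNOPQRSTUVWXYZ"
--     shifted_lower = "xyzabcdefghijklmnopqrstuvw"
--     shifted_upper = "XYZABCDEFGHIJKLMNOPQRSTUVW"
--     resultat = []
--     for mot in phrase[::-1].split():
--         # mot is already the mirror of the corresponding original word
--         if mot == mot[::-1]:
--             mot = "".join(
--                 shifted_lower[lower.index(c)] if c in lower
--                 else shifted_upper[upper.index(c)] if c in upper
--                 else c
--                 for c in mot)
--         resultat.append(mot)
--     return " ".join(reversed(resultat))
-- ===== Notes on version B (the rewrite author's own statement) =====
-- stated objective: alternative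
-- what changed: Instead of mirroring each word separately, B reverses the whole phrase once so every word of the reversed phrase is already the mirror of an original word, Caesar-shifts palindromes via a rotated-alphabet index lookup instead of per-character ord arithmetic, and builds the result back-to-front, un-reversing it at the end.
import Mathlib
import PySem

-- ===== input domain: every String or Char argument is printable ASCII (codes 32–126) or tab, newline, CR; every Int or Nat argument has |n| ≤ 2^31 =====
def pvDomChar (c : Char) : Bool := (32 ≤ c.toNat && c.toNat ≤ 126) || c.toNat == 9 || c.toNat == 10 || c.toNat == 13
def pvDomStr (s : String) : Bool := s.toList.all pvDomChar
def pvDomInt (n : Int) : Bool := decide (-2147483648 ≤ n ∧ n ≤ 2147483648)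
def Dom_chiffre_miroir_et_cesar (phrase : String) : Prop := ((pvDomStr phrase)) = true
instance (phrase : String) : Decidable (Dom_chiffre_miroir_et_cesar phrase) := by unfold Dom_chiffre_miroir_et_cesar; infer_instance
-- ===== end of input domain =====

-- B is a genuinely different algorithm: it reverses the WHOLE phrase once (each word of the
-- reversed phrase is already the mirror of an original word, so no per-word reversal),
-- Caesar-shifts palindromes by a rotated-alphabet index lookup, and builds the result
-- back-to-front, un-reversing it at the end (objective: alternative, same cost).

-- ===== PORT A =====

-- miroir(text) = text[::-1]
def miroirA (text : String) : String := String.ofList text.toList.reverse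

-- body of chiffre_cesar's for-loop for one character
def cesarCharA (cle : Int) (c : Char) : Char :=
  if PySem.Chars.isalpha c then
    let decalage := PySem.Int.mod cle 26
    if PySem.Chars.islower c then
      Char.ofNat (((PySem.Int.mod ((c.toNat : Int) - 97 - decalage) 26) + 97).toNat)
    else
      Char.ofNat (((PySem.Int.mod ((c.toNat : Int) - 65 - decalage) 26) + 65).toNat)
  else c

-- chiffre_cesar(text, cle): string built up by += in a loop
def chiffreCesarA (text : String) (cle : Int) : String :=
  String.ofList (text.toList.foldl (fun resultat char => resultat ++ [cesarCharA cle char]) [])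

def chiffre_miroir_et_cesar (phrase : String) : String :=
  PySem.Str.join " "
    ((PySem.Str.split₀ phrase).foldl
      (fun resultat mot =>
        if mot == miroirA mot then resultat ++ [chiffreCesarA mot 3]
        else resultat ++ [miroirA mot]) [])

-- ===== PORT B =====

def pvLowerB : List Char := "abcdefghijklmnopqrstuvwxyz".toList
def pvUpperB : List Char := "ABCDEFGHIJKLMNOPQRSTUVWXYZ".toList
def pvShiftLowerB : List Char := "xyzabcdefghijklmnopqrstuvw".toList
def pvShiftUpperB : List Char := "XYZABCDEFGHIJKLMNOPQRSTUVW".toList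

-- one character of the rotated-alphabet lookup:
-- shifted_lower[lower.index(c)] if c in lower else shifted_upper[upper.index(c)] if c in upper else c
def cesarCharB (c : Char) : Char :=
  if PySem.Chars.isIn [c] pvLowerB then
    PySem.List.pyGetD pvShiftLowerB (PySem.Chars.find pvLowerB [c]) c
  else if PySem.Chars.isIn [c] pvUpperB then
    PySem.List.pyGetD pvShiftUpperB (PySem.Chars.find pvUpperB [c]) c
  else c

def chiffre_miroir_et_cesar_alt (phrase : String) : String :=
  PySem.Str.join " "
    (((PySem.Str.split₀ (String.ofList phrase.toList.reverse)).foldl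
        (fun resultat mot =>
          resultat ++ [if mot == String.ofList mot.toList.reverse
                       then String.ofList (mot.toList.map cesarCharB)
                       else mot]) []).reverse)

-- ===== PRECONDITION & SPEC =====
def Spec_chiffre_miroir_et_cesar (phrase : String) (out : String) : Prop := out = chiffre_miroir_et_cesar_alt phrase
instance (phrase : String) (out : String) : Decidable (Spec_chiffre_miroir_et_cesar phrase out) := by unfold Spec_chiffre_miroir_et_cesar; infer_instance

-- ===== CLAIM (what is proved, stated in full; the proofs are below) =====
def Claim_equal_chiffre_miroir_et_cesar : Prop := ∀ (phrase : String), Dom_chiffre_miroir_et_cesar phrase → Spec_chiffre_miroir_et_cesar phrase (chiffre_miroir_et_cesar phrase)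

-- ===== LEMMAS AND PROOFS =====

-- keep a character while it is not whitespace (the predicate split() cuts on)
def pvP : Char → Bool := fun c => !PySem.Chars.isspace c

-- the words of a character list, as a plain structural function
def pvWords : List Char → List (List Char)
  | [] => []
  | c :: t =>
    if PySem.Chars.isspace c then pvWords t
    else (c :: t.takeWhile pvP) :: pvWords (t.dropWhile pvP)
termination_by l => l.length
decreasing_by
  · simp
  · exact Nat.lt_succ_of_le (List.length_dropWhile_le _ _)

-- invariant of split₀'s worker loop
theorem pv_go_eq (s : List Char) : ∀ (cur : List Char) (acc : List (List Char)),
    PySem.Chars.split₀.go s cur acc =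
      acc.reverse ++ (if cur.isEmpty then pvWords s
        else (cur.reverse ++ s.takeWhile pvP) :: pvWords (s.dropWhile pvP)) := by
  induction s with
  | nil =>
    intro cur acc
    by_cases h : cur.isEmpty <;> simp [PySem.Chars.split₀.go, h, pvWords]
  | cons c rest ih =>
    intro cur acc
    by_cases hc : PySem.Chars.isspace c
    · by_cases h : cur.isEmpty
      · rw [show PySem.Chars.split₀.go (c :: rest) cur acc = PySem.Chars.split₀.go rest [] acc from by
          simp [PySem.Chars.split₀.go, hc, h]]
        rw [ih]
        simp [h, pvWords, hc]
      · rw [show PySem.Chars.split₀.go (c :: rest) cur acc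
            = PySem.Chars.split₀.go rest [] (cur.reverse :: acc) from by
          simp [PySem.Chars.split₀.go, hc, h]]
        rw [ih]
        simp [h, pvWords, hc, pvP]
    · rw [show PySem.Chars.split₀.go (c :: rest) cur acc
          = PySem.Chars.split₀.go rest (c :: cur) acc from by
        simp [PySem.Chars.split₀.go, hc]]
      rw [ih]
      by_cases h : cur.isEmpty
      · have hnil : cur = [] := by simpa [List.isEmpty_iff] using h
        subst hnil
        simp [pvWords, hc]
      · simp [h, hc, pvP]

theorem pv_split_eq (s : List Char) : PySem.Chars.split₀ s = pvWords s := by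
  simpa [PySem.Chars.split₀] using pv_go_eq s [] []

-- a list all of whose characters are non-space is kept whole by takeWhile/dropWhile
theorem pv_take_all {l : List Char} (h : ∀ a ∈ l, pvP a = true) :
    l.takeWhile pvP = l ∧ l.dropWhile pvP = [] := by
  have hd : l.dropWhile pvP = [] := List.dropWhile_eq_nil_iff.mpr h
  refine ⟨?_, hd⟩
  have ht := List.takeWhile_append_dropWhile (p := pvP) (l := l)
  rw [hd] at ht
  simpa using ht

-- if dropWhile is nonempty, takeWhile is strictly shorter than the list
theorem pv_take_len_ne {u : List Char} (hne : u.dropWhile pvP ≠ []) :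
    (u.takeWhile pvP).length ≠ u.length := by
  have hsum : (u.takeWhile pvP).length + (u.dropWhile pvP).length = u.length := by
    conv_rhs => rw [← List.takeWhile_append_dropWhile (p := pvP) (l := u)]
    rw [List.length_append]
  have hpos : 0 < (u.dropWhile pvP).length := List.length_pos_of_ne_nil hne
  omega

-- a nonempty all-non-space list is exactly one word
theorem pv_words_all {v : List Char} (hne : v ≠ []) (h : ∀ a ∈ v, pvP a = true) :
    pvWords v = [v] := by
  cases v with
  | nil => exact absurd rfl hne
  | cons c v' =>
    have hc : pvP c = true := h c (by simp)
    have hsp : PySem.Chars.isspace c = false := by simpa [pvP] using hc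
    obtain ⟨ht, hd⟩ := pv_take_all (l := v') (fun a ha => h a (List.mem_cons_of_mem _ ha))
    simp [pvWords, hsp, ht, hd]

-- a trailing space does not change the words
theorem pv_words_snoc_space : ∀ (n : Nat) (u : List Char) (c : Char), u.length ≤ n →
    PySem.Chars.isspace c = true → pvWords (u ++ [c]) = pvWords u := by
  intro n
  induction n with
  | zero =>
    intro u c hu hc
    have : u = [] := List.eq_nil_of_length_eq_zero (Nat.le_zero.mp hu)
    subst this
    simp [pvWords, hc]
  | succ n ih =>
    intro u c hu hc
    cases u with
    | nil => simp [pvWords, hc]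
    | cons d u' =>
      by_cases hd : PySem.Chars.isspace d
      · simp only [List.cons_append]
        simp [pvWords, hd]
        exact ih u' c (by simpa using Nat.le_of_succ_le_succ hu) hc
      · have hPc : pvP c = false := by simp [pvP, hc]
        by_cases hall : ∀ a ∈ u', pvP a = true
        · obtain ⟨ht, hdr⟩ := pv_take_all hall
          have h1 : (u' ++ [c]).takeWhile pvP = u' := by
            rw [List.takeWhile_append]
            simp [ht, List.takeWhile, hPc]
          have h2 : (u' ++ [c]).dropWhile pvP = [c] := by
            rw [List.dropWhile_append]
            simp [hdr, List.dropWhile, hPc]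
          simp [List.cons_append, pvWords, hd, h1, h2, ht, hdr, hc]
        · have hne : u'.dropWhile pvP ≠ [] := by
            intro h0
            exact hall (List.dropWhile_eq_nil_iff.mp h0)
          have hlen := pv_take_len_ne hne
          have h1 : (u' ++ [c]).takeWhile pvP = u'.takeWhile pvP := by
            rw [List.takeWhile_append]
            simp [hlen]
          have h2 : (u' ++ [c]).dropWhile pvP = u'.dropWhile pvP ++ [c] := by
            rw [List.dropWhile_append]
            simp [hne]
          have ihs : pvWords (u'.dropWhile pvP ++ [c]) = pvWords (u'.dropWhile pvP) :=
            ih _ c (le_trans (List.length_dropWhile_le _ _)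
              (by simpa using Nat.le_of_succ_le_succ hu)) hc
          simp [List.cons_append, pvWords, hd, h1, h2, ihs]

-- a space at the end of u makes the words of u ++ v split cleanly
theorem pv_words_append : ∀ (n : Nat) (u v : List Char), u.length ≤ n → (hne : u ≠ []) →
    PySem.Chars.isspace (u.getLast hne) = true → pvWords (u ++ v) = pvWords u ++ pvWords v := by
  intro n
  induction n with
  | zero =>
    intro u v hu hne _
    exact absurd (List.eq_nil_of_length_eq_zero (Nat.le_zero.mp hu)) hne
  | succ n ih =>
    intro u v hu hne hlast
    cases u with
    | nil => exact absurd rfl hne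
    | cons d u' =>
      by_cases hu' : u' = []
      · subst hu'
        have hd : PySem.Chars.isspace d = true := by simpa using hlast
        simp [pvWords, hd]
      · have hlast' : PySem.Chars.isspace (u'.getLast hu') = true := by
          rw [← List.getLast_cons hu' (a := d)]
          exact hlast
        by_cases hd : PySem.Chars.isspace d
        · simp only [List.cons_append]
          simp [pvWords, hd]
          exact ih u' v (by simpa using Nat.le_of_succ_le_succ hu) hu' hlast'
        · have hmem : u'.getLast hu' ∈ u' := List.getLast_mem hu'
          have hne2 : u'.dropWhile pvP ≠ [] := by
            intro h0
            have := List.dropWhile_eq_nil_iff.mp h0 _ hmem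
            simp [pvP, hlast'] at this
          have hlen := pv_take_len_ne hne2
          have h1 : (u' ++ v).takeWhile pvP = u'.takeWhile pvP := by
            rw [List.takeWhile_append]
            simp [hlen]
          have h2 : (u' ++ v).dropWhile pvP = u'.dropWhile pvP ++ v := by
            rw [List.dropWhile_append]
            simp [hne2]
          have hlast2 : PySem.Chars.isspace ((u'.dropWhile pvP).getLast hne2) = true := by
            rw [(List.dropWhile_suffix pvP).getLast hne2]
            exact hlast'
          have ihs := ih (u'.dropWhile pvP) v
            (le_trans (List.length_dropWhile_le _ _) (by simpa using Nat.le_of_succ_le_succ hu))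
            hne2 hlast2
          simp [List.cons_append, pvWords, hd, h1, h2, ihs]

-- reversing the input reverses the word list and each word
theorem pv_words_reverse : ∀ (n : Nat) (s : List Char), s.length ≤ n →
    pvWords s.reverse = (pvWords s).reverse.map List.reverse := by
  intro n
  induction n with
  | zero =>
    intro s hs
    have : s = [] := List.eq_nil_of_length_eq_zero (Nat.le_zero.mp hs)
    subst this
    simp [pvWords]
  | succ n ih =>
    intro s hs
    cases s with
    | nil => simp [pvWords]
    | cons c t =>
      by_cases hc : PySem.Chars.isspace c
      · have h1 : (c :: t).reverse = t.reverse ++ [c] := by simp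
        rw [h1, pv_words_snoc_space t.reverse.length _ c le_rfl hc]
        rw [ih t (by simpa using Nat.le_of_succ_le_succ hs)]
        simp [pvWords, hc]
      · have hallw : ∀ a ∈ c :: t.takeWhile pvP, pvP a = true := by
          intro a ha
          rcases List.mem_cons.mp ha with h | h
          · subst h; simp [pvP, hc]
          · exact List.mem_takeWhile_imp h
        have hwne : (c :: t.takeWhile pvP) ≠ [] := by simp
        have hrev : (c :: t).reverse
            = (t.dropWhile pvP).reverse ++ (c :: t.takeWhile pvP).reverse := by
          conv_lhs => rw [show c :: t = (c :: t.takeWhile pvP) ++ t.dropWhile pvP from by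
            simp [List.takeWhile_append_dropWhile]]
          rw [List.reverse_append]
        have hWs : pvWords (c :: t) = (c :: t.takeWhile pvP) :: pvWords (t.dropWhile pvP) := by
          simp [pvWords, hc]
        have hallwrev : ∀ a ∈ (c :: t.takeWhile pvP).reverse, pvP a = true := by
          intro a ha; exact hallw a (List.mem_reverse.mp ha)
        have hwrevne : (c :: t.takeWhile pvP).reverse ≠ [] := by simp
        by_cases hre : t.dropWhile pvP = []
        · rw [hrev, hre]
          simp only [List.reverse_nil, List.nil_append]
          rw [pv_words_all hwrevne hallwrev, hWs, hre]
          simp [pvWords]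
        · have hrrev_ne : (t.dropWhile pvP).reverse ≠ [] := by simpa using hre
          have hhead : PySem.Chars.isspace ((t.dropWhile pvP).head hre) = true := by
            have := List.head_dropWhile_not pvP hre
            simpa [pvP] using this
          have hlastrev : PySem.Chars.isspace ((t.dropWhile pvP).reverse.getLast hrrev_ne) = true := by
            rw [List.getLast_reverse]
            exact hhead
          rw [hrev, pv_words_append (t.dropWhile pvP).reverse.length _ _ le_rfl hrrev_ne hlastrev]
          rw [pv_words_all hwrevne hallwrev]
          rw [ih (t.dropWhile pvP) (le_trans (List.length_dropWhile_le _ _)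
            (by simpa using Nat.le_of_succ_le_succ hs))]
          rw [hWs]
          simp

-- split() of the reversed phrase: the words, reversed, each mirrored
theorem pv_split_rev (cs : List Char) :
    PySem.Chars.split₀ cs.reverse = (PySem.Chars.split₀ cs).reverse.map List.reverse := by
  rw [pv_split_eq, pv_split_eq, pv_words_reverse cs.length cs le_rfl]

-- the 52 letters, as a list
def pvLetters : List Char :=
  "abcdefghijklmnopqrstuvwxyzABCDEFGHIJKLMNOPQRSTUVWXYZ".toList

theorem pv_alpha_mem (c : Char) (h : PySem.Chars.isalpha c = true) : c ∈ pvLetters := by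
  have hn : (65 ≤ c.toNat ∧ c.toNat ≤ 90) ∨ (97 ≤ c.toNat ∧ c.toNat ≤ 122) := by
    simp only [PySem.Chars.isalpha, PySem.Chars.isupper, PySem.Chars.islower,
      Bool.or_eq_true, Bool.and_eq_true, decide_eq_true_eq, Char.le_def,
      UInt32.le_iff_toNat_le] at h
    have hc : c.toNat = c.val.toNat := rfl
    have h1 : 'A'.val.toNat = 65 := by decide
    have h2 : 'Z'.val.toNat = 90 := by decide
    have h3 : 'a'.val.toNat = 97 := by decide
    have h4 : 'z'.val.toNat = 122 := by decide
    omega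
  have key : (List.range 123).all (fun n => decide
      (((65 ≤ n ∧ n ≤ 90) ∨ (97 ≤ n ∧ n ≤ 122)) → Char.ofNat n ∈ pvLetters)) = true := by
    decide
  have := of_decide_eq_true (List.all_eq_true.mp key c.toNat (List.mem_range.mpr (by omega))) hn
  rwa [Char.ofNat_toNat] at this

theorem pv_letters_eq : ∀ x ∈ pvLetters, cesarCharB x = cesarCharA 3 x := by
  have h : pvLetters.all (fun x => cesarCharB x == cesarCharA 3 x) = true := by decide
  exact fun x hx => eq_of_beq (List.all_eq_true.mp h x hx)

theorem pv_lower_alpha : ∀ x ∈ pvLowerB, PySem.Chars.isalpha x = true := by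
  have h : pvLowerB.all PySem.Chars.isalpha = true := by decide
  exact fun x hx => List.all_eq_true.mp h x hx

theorem pv_upper_alpha : ∀ x ∈ pvUpperB, PySem.Chars.isalpha x = true := by
  have h : pvUpperB.all PySem.Chars.isalpha = true := by decide
  exact fun x hx => List.all_eq_true.mp h x hx

theorem pv_char_eq (c : Char) : cesarCharB c = cesarCharA 3 c := by
  by_cases h : PySem.Chars.isalpha c = true
  · exact pv_letters_eq c (pv_alpha_mem c h)
  · have hL : PySem.Chars.isIn [c] pvLowerB = false := by
      rw [PySem.Chars.isIn_eq_false_iff]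
      intro hinf
      exact h (pv_lower_alpha c (hinf.subset (by simp)))
    have hU : PySem.Chars.isIn [c] pvUpperB = false := by
      rw [PySem.Chars.isIn_eq_false_iff]
      intro hinf
      exact h (pv_upper_alpha c (hinf.subset (by simp)))
    simp [cesarCharB, cesarCharA, hL, hU, h]

-- what A's per-word branch computes, on the character level
def pvFL (l : List Char) : List Char :=
  if l = l.reverse then l.map (cesarCharA 3) else l.reverse

-- what B's per-word branch computes, on the character level
def pvGL (l : List Char) : List Char :=
  if l = l.reverse then l.map cesarCharB else l

theorem pv_cesarA_toList (mot : String) :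
    (chiffreCesarA mot 3).toList = mot.toList.map (cesarCharA 3) := by
  rw [chiffreCesarA, String.toList_ofList, PySem.List.foldl_append_singleton_eq_map,
    List.nil_append]

theorem pv_f_toList (mot : String) :
    (if mot == miroirA mot then chiffreCesarA mot 3 else miroirA mot).toList
      = pvFL mot.toList := by
  by_cases h : mot.toList = mot.toList.reverse
  · have hbeq : (mot == miroirA mot) = true := by
      rw [beq_iff_eq]
      apply String.toList_inj.mp
      rw [miroirA, String.toList_ofList]
      exact h
    rw [if_pos hbeq, pv_cesarA_toList, pvFL, if_pos h]
  · have hbeq : (mot == miroirA mot) = false := by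
      rw [beq_eq_false_iff_ne]
      intro heq
      apply h
      have hc := congrArg String.toList heq
      rwa [miroirA, String.toList_ofList] at hc
    rw [if_neg (by simp [hbeq]), pvFL, if_neg h, miroirA, String.toList_ofList]

theorem pv_g_toList (mot : String) :
    (if mot == String.ofList mot.toList.reverse then String.ofList (mot.toList.map cesarCharB)
     else mot).toList = pvGL mot.toList := by
  by_cases h : mot.toList = mot.toList.reverse
  · have hbeq : (mot == String.ofList mot.toList.reverse) = true := by
      rw [beq_iff_eq]
      apply String.toList_inj.mp
      rw [String.toList_ofList]
      exact h
    rw [if_pos hbeq, String.toList_ofList, pvGL, if_pos h]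
  · have hbeq : (mot == String.ofList mot.toList.reverse) = false := by
      rw [beq_eq_false_iff_ne]
      intro heq
      apply h
      have hc := congrArg String.toList heq
      rwa [String.toList_ofList] at hc
    rw [if_neg (by simp [hbeq]), pvGL, if_neg h]

theorem pv_word_eq (w : List Char) : pvGL w.reverse = pvFL w := by
  by_cases h : w = w.reverse
  · rw [pvGL, pvFL, if_pos (by rw [List.reverse_reverse]; exact h.symm), if_pos h]
    rw [← h]
    exact List.map_congr_left (fun c _ => pv_char_eq c)
  · rw [pvGL, pvFL, if_neg (by rw [List.reverse_reverse]; exact fun he => h he.symm), if_neg h]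

-- ===== VERDICT (by name: the statement is the Claim_ definition above) =====
theorem chiffre_miroir_et_cesar_spec : Claim_equal_chiffre_miroir_et_cesar := by
  intro phrase _
  unfold Spec_chiffre_miroir_et_cesar chiffre_miroir_et_cesar chiffre_miroir_et_cesar_alt
  apply String.toList_inj.mp
  rw [show (fun (resultat : List String) mot =>
        if mot == miroirA mot then resultat ++ [chiffreCesarA mot 3]
        else resultat ++ [miroirA mot])
      = (fun resultat mot => resultat ++
          [if mot == miroirA mot then chiffreCesarA mot 3 else miroirA mot]) from by
    funext resultat mot; split <;> rfl]
  rw [PySem.List.foldl_append_singleton_eq_map, PySem.List.foldl_append_singleton_eq_map]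
  simp only [List.nil_append]
  rw [PySem.Str.toList_join, PySem.Str.toList_join]
  congr 1
  rw [List.map_reverse, List.map_map, List.map_map]
  have hA : (PySem.Str.split₀ phrase).map
      (String.toList ∘ fun mot =>
        if mot == miroirA mot then chiffreCesarA mot 3 else miroirA mot)
      = ((PySem.Str.split₀ phrase).map String.toList).map pvFL := by
    rw [List.map_map]
    exact List.map_congr_left (fun mot _ => pv_f_toList mot)
  have hB : (PySem.Str.split₀ (String.ofList phrase.toList.reverse)).map
      (String.toList ∘ fun mot =>
        if mot == String.ofList mot.toList.reverse then String.ofList (mot.toList.map cesarCharB)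
        else mot)
      = ((PySem.Str.split₀ (String.ofList phrase.toList.reverse)).map String.toList).map pvGL := by
    rw [List.map_map]
    exact List.map_congr_left (fun mot _ => pv_g_toList mot)
  rw [hA, hB, PySem.Str.split₀_map_toList, PySem.Str.split₀_map_toList,
     String.toList_ofList, pv_split_rev]
  rw [List.map_map, List.map_reverse, List.reverse_reverse]
  exact (List.map_congr_left (fun w _ => (pv_word_eq w))).symm
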